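-- pv_equiv track=rewrite | github.com/jeffhultman/CS415Proj1 | Proj1.py | gcdConsecInter
-- ===== SOURCE A (Python) =====
-- def gcdConsecInter(m, n):
--     divisor = n
--     count = 0
--     while divisor > 0:
--         count += 1
--         if (m % divisor == 0):
--             count += 1
--             if (n % divisor == 0):
--                 return [divisor, count]
--         divisor -= 1
-- ===== SOURCE B (Python) =====
-- def gcdConsecInter(m, n):
--     if n <= 0:
--         return None
--     # gcd by Euclid
--     a, b = abs(m), n
--     while b:
--         a, b = b, a % b
--     g = a
--     # count divisors of m lying in [g, n]; every integer divides 0, and [g, n] = [n, n] then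
--     if m == 0:
--         extra = 1
--     else:
--         M = abs(m)
--         extra = 0
--         d = 1
--         while d * d <= M:
--             if M % d == 0:
--                 if g <= d <= n:
--                     extra += 1
--                 e = M // d
--                 if e != d and g <= e <= n:
--                     extra += 1
--             d += 1
--     return [g, (n - g + 1) + extra]
-- ===== Notes on version B (the rewrite author's own statement) =====
-- stated objective: faster
-- what changed: A scans divisors downward from n in O(n); B computes the gcd with Euclid's algorithm and reconstructs A's operation count as (n-g+1) plus the number of divisors of m in [g,n], found by a sqrt(|m|) divisor-pair enumeration.
import Mathlib
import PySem

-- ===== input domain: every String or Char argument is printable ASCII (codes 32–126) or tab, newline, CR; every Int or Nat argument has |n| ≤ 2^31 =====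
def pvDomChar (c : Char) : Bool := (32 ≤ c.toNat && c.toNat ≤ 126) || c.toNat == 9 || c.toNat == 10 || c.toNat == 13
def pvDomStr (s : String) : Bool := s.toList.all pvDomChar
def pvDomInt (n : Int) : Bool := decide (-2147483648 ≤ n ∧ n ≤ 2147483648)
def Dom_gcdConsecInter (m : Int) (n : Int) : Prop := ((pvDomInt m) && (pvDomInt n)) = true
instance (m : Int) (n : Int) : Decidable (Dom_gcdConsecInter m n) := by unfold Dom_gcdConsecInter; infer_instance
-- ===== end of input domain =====

-- B replaces A's descending O(n) divisor scan by Euclid's algorithm for the gcd plus a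
-- sqrt(|m|) divisor-pair enumeration that reconstructs A's operation count.

-- ===== PORT A =====
-- the while loop of A: divisor counts down, count accumulates
def pvLoopA (m n divisor count : Int) : Option (List Int) :=
  if _h : 0 < divisor then
    let count1 := count + 1
    if PySem.Int.mod m divisor = 0 then
      let count2 := count1 + 1
      if PySem.Int.mod n divisor = 0 then some [divisor, count2]
      else pvLoopA m n (divisor - 1) count2
    else pvLoopA m n (divisor - 1) count1
  else none
termination_by divisor.toNat
decreasing_by all_goals omega

def gcdConsecInter (m : Int) (n : Int) : Option (List Int) := pvLoopA m n n 0

-- ===== PORT B =====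
-- Euclid's loop: while b: a, b = b, a % b
def pvEuclid (a b : Int) : Int :=
  if _h : b ≠ 0 then pvEuclid b (PySem.Int.mod a b) else a
termination_by b.natAbs
decreasing_by
  rcases lt_trichotomy b 0 with hb | hb | hb
  · have := PySem.Int.mod_neg_bounds (a := a) hb; omega
  · exact absurd hb _h
  · have h1 := PySem.Int.mod_nonneg (a := a) hb
    have h2 := PySem.Int.mod_lt (a := a) hb
    omega

-- divisor-pair scan: while d*d <= M, counting divisors of M inside [g, n]
def pvSqrtLoop (M g n d extra : Int) : Int :=
  if h : d * d ≤ M then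
    let extra1 :=
      if PySem.Int.mod M d = 0 then
        let extra2 := if g ≤ d ∧ d ≤ n then extra + 1 else extra
        let e := PySem.Int.floordiv M d
        if e ≠ d ∧ g ≤ e ∧ e ≤ n then extra2 + 1 else extra2
      else extra
    pvSqrtLoop M g n (d + 1) extra1
  else extra
termination_by (M + 1 - d).toNat
decreasing_by
  have hdM : d ≤ M := by rcases lt_trichotomy d 0 with h0 | h0 | h0 <;> nlinarith
  omega

def gcdConsecInter_alt (m : Int) (n : Int) : Option (List Int) :=
  if n ≤ 0 then none
  else
    let g := pvEuclid (m.natAbs : Int) n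
    let extra : Int :=
      if m = 0 then 1
      else pvSqrtLoop (m.natAbs : Int) g n 1 0
    some [g, (n - g + 1) + extra]

-- ===== PRECONDITION & SPEC =====
def Spec_gcdConsecInter (m : Int) (n : Int) (out : Option (List Int)) : Prop := out = gcdConsecInter_alt m n
instance (m : Int) (n : Int) (out : Option (List Int)) : Decidable (Spec_gcdConsecInter m n out) := by unfold Spec_gcdConsecInter; infer_instance

-- ===== CLAIM (what is proved, stated in full; the proofs are below) =====
def Claim_equal_gcdConsecInter : Prop := ∀ (m : Int) (n : Int), Dom_gcdConsecInter m n → Spec_gcdConsecInter m n (gcdConsecInter m n)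

-- ===== LEMMAS AND PROOFS =====

lemma pvLoopA_nonpos (m n c d : Int) (h : ¬ 0 < d) : pvLoopA m n d c = none := by
  rw [pvLoopA]; simp [h]

lemma loopA_eq (m n g : Int) (hg : 1 ≤ g) (hgm : g ∣ m) (hgn : g ∣ n)
    (hmax : ∀ t : Int, g < t → t ∣ m → t ∣ n → False) :
    ∀ (k : Nat) (c : Int),
      pvLoopA m n (g + (k : Int)) c
        = some [g, c + ((k : Int) + 1)
            + ((((Finset.Icc g (g + (k : Int))).filter (fun t => t ∣ m)).card : Nat) : Int)] := by
  intro k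
  induction k with
  | zero =>
    intro c
    have hcard : ((Finset.Icc g (g + ((0 : Nat) : Int))).filter (fun t => t ∣ m)).card = 1 := by
      simp [Finset.Icc_self, Finset.filter_singleton, hgm]
    rw [pvLoopA, hcard]
    simp only [Nat.cast_zero, add_zero]
    rw [dif_pos (by omega : (0:Int) < g)]
    simp only [PySem.Int.mod_eq_zero_iff_dvd, if_pos hgm, if_pos hgn]
    norm_num
  | succ k ih =>
    intro c
    have hd : (0:Int) < g + ((k + 1 : Nat) : Int) := by push_cast; omega
    have harg : g + ((k + 1 : Nat) : Int) - 1 = g + (k : Int) := by push_cast; ring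
    rw [pvLoopA, dif_pos hd]
    by_cases hdm : (g + ((k + 1 : Nat) : Int)) ∣ m
    · have hdn : ¬ (g + ((k + 1 : Nat) : Int)) ∣ n := by
        intro h; exact hmax _ (by push_cast; omega) hdm h
      simp only [PySem.Int.mod_eq_zero_iff_dvd, if_pos hdm, if_neg hdn]
      rw [harg, ih]
      have hcard : ((Finset.Icc g (g + ((k + 1 : Nat) : Int))).filter (fun t => t ∣ m)).card
          = ((Finset.Icc g (g + (k : Int))).filter (fun t => t ∣ m)).card + 1 := by
        have hins : (Finset.Icc g (g + ((k + 1 : Nat) : Int))).filter (fun t => t ∣ m)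
            = insert (g + (k : Int) + 1) ((Finset.Icc g (g + (k : Int))).filter (fun t => t ∣ m)) := by
          ext t
          simp only [Finset.mem_filter, Finset.mem_Icc, Finset.mem_insert]
          constructor
          · rintro ⟨⟨h1, h2⟩, h3⟩
            by_cases ht : t = g + (k : Int) + 1
            · exact Or.inl ht
            · exact Or.inr ⟨⟨h1, by push_cast at h2 ⊢; omega⟩, h3⟩
          · rintro (rfl | ⟨⟨h1, h2⟩, h3⟩)
            · refine ⟨⟨by omega, by push_cast; omega⟩, ?_⟩
              have he : g + ((k + 1 : Nat) : Int) = g + (k : Int) + 1 := by push_cast; ring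
              rw [← he]; exact hdm
            · exact ⟨⟨h1, by push_cast; omega⟩, h3⟩
        rw [hins, Finset.card_insert_of_notMem]
        simp only [Finset.mem_filter, Finset.mem_Icc]
        rintro ⟨⟨_, h2⟩, _⟩; omega
      rw [hcard]
      exact congrArg (fun z => some [g, z]) (by push_cast; ring)
    · simp only [PySem.Int.mod_eq_zero_iff_dvd, if_neg hdm]
      rw [harg, ih]
      have hcard : ((Finset.Icc g (g + ((k + 1 : Nat) : Int))).filter (fun t => t ∣ m)).card
          = ((Finset.Icc g (g + (k : Int))).filter (fun t => t ∣ m)).card := by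
        congr 1
        ext t
        simp only [Finset.mem_filter, Finset.mem_Icc]
        constructor
        · rintro ⟨⟨h1, h2⟩, h3⟩
          refine ⟨⟨h1, ?_⟩, h3⟩
          by_cases ht : t = g + ((k + 1 : Nat) : Int)
          · exact absurd (ht ▸ h3) hdm
          · push_cast at h2 ⊢; omega
        · rintro ⟨⟨h1, h2⟩, h3⟩
          exact ⟨⟨h1, by push_cast at h2 ⊢; omega⟩, h3⟩
      rw [hcard]
      exact congrArg (fun z => some [g, z]) (by push_cast; ring)

-- A's result for positive n, with g the gcd
lemma A_eq (m n : Int) (hn : 1 ≤ n) :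
    gcdConsecInter m n
      = some [(Int.gcd m n : Int), (n - (Int.gcd m n : Int) + 1)
          + ((((Finset.Icc (Int.gcd m n : Int) n).filter (fun t => t ∣ m)).card : Nat) : Int)] := by
  have hg : 1 ≤ (Int.gcd m n : Int) := by
    have := Int.gcd_pos_of_ne_zero_right m (show n ≠ 0 by omega)
    omega
  have hgm : (Int.gcd m n : Int) ∣ m := Int.gcd_dvd_left m n
  have hgn : (Int.gcd m n : Int) ∣ n := Int.gcd_dvd_right m n
  have hgle : (Int.gcd m n : Int) ≤ n := Int.le_of_dvd (by omega) hgn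
  have hmax : ∀ t : Int, (Int.gcd m n : Int) < t → t ∣ m → t ∣ n → False := by
    intro t ht h1 h2
    have : t ≤ (Int.gcd m n : Int) := Int.le_of_dvd (by omega) (by rw [Int.coe_gcd]; exact dvd_gcd h1 h2)
    omega
  have hk : (Int.gcd m n : Int) + (((n - (Int.gcd m n : Int)).toNat : Nat) : Int) = n := by omega
  have h := loopA_eq m n (Int.gcd m n : Int) hg hgm hgn hmax (n - (Int.gcd m n : Int)).toNat 0
  rw [hk] at h
  unfold gcdConsecInter
  rw [h]
  have h2 : (((n - (Int.gcd m n : Int)).toNat : Nat) : Int) = n - (Int.gcd m n : Int) := by omega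
  rw [h2]
  norm_num

lemma euclid_eq : ∀ (fuel : Nat) (a b : Int), 0 ≤ a → 0 ≤ b → b.natAbs ≤ fuel →
    pvEuclid a b = (Int.gcd a b : Int) := by
  intro fuel
  induction fuel with
  | zero =>
    intro a b ha hb hf
    have hb0 : b = 0 := by omega
    subst hb0
    rw [pvEuclid, dif_neg (by simp), Int.gcd_zero_right]
    exact (Int.natAbs_of_nonneg ha).symm
  | succ fuel ih =>
    intro a b ha hb hf
    by_cases hb0 : b = 0
    · subst hb0
      rw [pvEuclid, dif_neg (by simp), Int.gcd_zero_right]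
      exact (Int.natAbs_of_nonneg ha).symm
    · have hbpos : 0 < b := by omega
      rw [pvEuclid, dif_pos hb0, PySem.Int.mod_eq_emod_of_pos hbpos]
      have h1 : 0 ≤ a % b := Int.emod_nonneg a hb0
      have h2 : a % b < b := Int.emod_lt_of_pos a hbpos
      rw [ih b (a % b) hb h1 (by omega)]
      congr 1
      unfold Int.gcd
      rw [Int.natAbs_emod_of_nonneg ha b]
      conv_lhs => rw [Nat.gcd_comm]
      rw [← Nat.gcd_rec]
      exact Nat.gcd_comm _ _

-- inside [g,n] no divisor pair survives once d*d > M
lemma filter_empty_of_sq_gt (M g n d : Int) (hg : 1 ≤ g) (hd : 1 ≤ d) (h : M < d * d) :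
    (Finset.Icc g n).filter (fun t => t ∣ M ∧ d ≤ t ∧ d ≤ M / t) = ∅ := by
  rw [Finset.filter_eq_empty_iff]
  rintro t ht ⟨htM, h1, h2⟩
  have ht1 : 1 ≤ t := le_trans hg (Finset.mem_Icc.mp ht).1
  have hmul : M / t * t = M := Int.ediv_mul_cancel htM
  nlinarith

-- one sqrt-scan step removes exactly the divisor pair {d, M/d}
lemma filter_step (M g n d : Int) (hM : 1 ≤ M) (hg : 1 ≤ g) (hd : 1 ≤ d) (hsq : d * d ≤ M) :
    ((((Finset.Icc g n).filter (fun t => t ∣ M ∧ d ≤ t ∧ d ≤ M / t)).card : Nat) : Int)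
      = ((((Finset.Icc g n).filter (fun t => t ∣ M ∧ d + 1 ≤ t ∧ d + 1 ≤ M / t)).card : Nat) : Int)
        + (if d ∣ M then
             ((if g ≤ d ∧ d ≤ n then (1:Int) else 0)
              + (if M / d ≠ d ∧ g ≤ M / d ∧ M / d ≤ n then (1:Int) else 0))
           else 0) := by
  by_cases hdM : d ∣ M
  · have hd0 : d ≠ 0 := by omega
    have hcop : M / d * d = M := Int.ediv_mul_cancel hdM
    have hled : d ≤ M / d := (Int.le_ediv_iff_mul_le (by omega : (0:Int) < d)).mpr hsq
    have hMdd : M / (M / d) = d := by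
      obtain ⟨c, hc⟩ := hdM
      have hc0 : c ≠ 0 := by rintro rfl; rw [mul_zero] at hc; omega
      subst hc
      rw [Int.mul_ediv_cancel_left c hd0, Int.mul_ediv_cancel d hc0]
    have hMddvd : M / d ∣ M := ⟨d, hcop.symm⟩
    have hsplit : (Finset.Icc g n).filter (fun t => t ∣ M ∧ d ≤ t ∧ d ≤ M / t)
        = ((Finset.Icc g n).filter (fun t => t ∣ M ∧ d + 1 ≤ t ∧ d + 1 ≤ M / t))
          ∪ ((Finset.Icc g n).filter (fun t => t = d ∨ t = M / d)) := by
      ext t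
      simp only [Finset.mem_filter, Finset.mem_union, Finset.mem_Icc]
      constructor
      · rintro ⟨hticc, htM, h1, h2⟩
        by_cases ht : t = d
        · exact Or.inr ⟨hticc, Or.inl ht⟩
        · by_cases ht2 : M / t = d
          · have h0 : M / t * t = M := Int.ediv_mul_cancel htM
            have hMt : M = d * t := by rw [← ht2]; exact h0.symm
            have : t = M / d := by rw [hMt, Int.mul_ediv_cancel_left t hd0]
            exact Or.inr ⟨hticc, Or.inr this⟩
          · exact Or.inl ⟨hticc, htM, by omega, by omega⟩
      · rintro (⟨hticc, htM, h1, h2⟩ | ⟨hticc, rfl | rfl⟩)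
        · exact ⟨hticc, htM, by omega, by omega⟩
        · exact ⟨hticc, hdM, le_refl _, hled⟩
        · exact ⟨hticc, hMddvd, hled, by rw [hMdd]⟩
    have hdisj : Disjoint ((Finset.Icc g n).filter (fun t => t ∣ M ∧ d + 1 ≤ t ∧ d + 1 ≤ M / t))
        ((Finset.Icc g n).filter (fun t => t = d ∨ t = M / d)) := by
      rw [Finset.disjoint_left]
      intro t ht1 ht2
      simp only [Finset.mem_filter] at ht1 ht2
      rcases ht2.2 with rfl | rfl
      · omega
      · have := ht1.2.2.2
        rw [hMdd] at this
        omega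
    have hsecond : ((((Finset.Icc g n).filter (fun t => t = d ∨ t = M / d)).card : Nat) : Int)
        = (if g ≤ d ∧ d ≤ n then (1:Int) else 0)
          + (if M / d ≠ d ∧ g ≤ M / d ∧ M / d ≤ n then (1:Int) else 0) := by
      by_cases heq : M / d = d
      · have hcg : (Finset.Icc g n).filter (fun t => t = d ∨ t = M / d)
            = (Finset.Icc g n).filter (fun t => t = d) := by
          apply Finset.filter_congr; intro t _; simp [heq]
        rw [hcg, Finset.filter_eq']
        by_cases hmem : d ∈ Finset.Icc g n
        · rw [if_pos hmem]
          have := Finset.mem_Icc.mp hmem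
          simp [heq, this.1, this.2]
        · rw [if_neg hmem]
          rw [Finset.mem_Icc] at hmem
          simp only [Finset.card_empty, Nat.cast_zero]
          rw [if_neg (by tauto), if_neg (by tauto)]
          omega
      · have hcg : (Finset.Icc g n).filter (fun t => t = d ∨ t = M / d)
            = ((Finset.Icc g n).filter (fun t => t = d)) ∪ ((Finset.Icc g n).filter (fun t => t = M / d)) := by
          rw [← Finset.filter_or]
        rw [hcg, Finset.card_union_of_disjoint]
        · rw [Finset.filter_eq', Finset.filter_eq']
          by_cases hm1 : d ∈ Finset.Icc g n <;> by_cases hm2 : M / d ∈ Finset.Icc g n <;>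
            rw [Finset.mem_Icc] at hm1 hm2 <;>
            simp [hm1, hm2, heq]
        · rw [Finset.disjoint_left]
          intro t ht1 ht2
          simp only [Finset.mem_filter] at ht1 ht2
          exact heq (by rw [← ht2.2]; exact ht1.2)
    rw [if_pos hdM, hsplit, Finset.card_union_of_disjoint hdisj]
    push_cast
    rw [← hsecond]
  · rw [if_neg hdM]
    have hcg : (Finset.Icc g n).filter (fun t => t ∣ M ∧ d ≤ t ∧ d ≤ M / t)
        = (Finset.Icc g n).filter (fun t => t ∣ M ∧ d + 1 ≤ t ∧ d + 1 ≤ M / t) := by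
      apply Finset.filter_congr
      intro t ht
      rw [Finset.mem_Icc] at ht
      constructor
      · rintro ⟨htM, h1, h2⟩
        refine ⟨htM, ?_, ?_⟩
        · rcases eq_or_lt_of_le h1 with h | h
          · exact absurd (h ▸ htM) hdM
          · omega
        · rcases eq_or_lt_of_le h2 with h | h
          · exfalso
            apply hdM
            refine ⟨t, ?_⟩
            rw [h]
            exact (Int.ediv_mul_cancel htM).symm
          · omega
      · rintro ⟨htM, h1, h2⟩
        exact ⟨htM, by omega, by omega⟩
    rw [hcg]
    omega

lemma loopS_eq (M g n : Int) (hM : 1 ≤ M) (hg : 1 ≤ g) :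
    ∀ (fuel : Nat) (d extra : Int), 1 ≤ d → (M + 1 - d).toNat ≤ fuel →
      pvSqrtLoop M g n d extra
        = extra + ((((Finset.Icc g n).filter (fun t => t ∣ M ∧ d ≤ t ∧ d ≤ M / t)).card : Nat) : Int) := by
  intro fuel
  induction fuel with
  | zero =>
    intro d extra hd hf
    have hd' : M + 1 ≤ d := by omega
    have hdM : M < d * d := by nlinarith
    rw [pvSqrtLoop, dif_neg (by omega)]
    rw [filter_empty_of_sq_gt M g n d hg hd hdM]
    simp
  | succ fuel ih =>
    intro d extra hd hf
    by_cases hsq : d * d ≤ M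
    · have hdleM : d ≤ M := by nlinarith
      rw [pvSqrtLoop, dif_pos hsq]
      rw [ih (d + 1) _ (by omega) (by omega)]
      rw [filter_step M g n d hM hg hd hsq]
      simp only [PySem.Int.mod_eq_zero_iff_dvd,
        PySem.Int.floordiv_eq_ediv_of_pos (show (0:Int) < d by omega)]
      split_ifs <;> ring
    · rw [pvSqrtLoop, dif_neg hsq]
      rw [filter_empty_of_sq_gt M g n d hg hd (by omega)]
      simp

-- B's result for positive n, nonzero m
lemma B_eq (m n : Int) (hn : 1 ≤ n) (hm : m ≠ 0) :
    gcdConsecInter_alt m n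
      = some [(Int.gcd m n : Int), (n - (Int.gcd m n : Int) + 1)
          + ((((Finset.Icc (Int.gcd m n : Int) n).filter (fun t => t ∣ m)).card : Nat) : Int)] := by
  have hM : (1:Int) ≤ (m.natAbs : Int) := by omega
  have hgcd : pvEuclid (m.natAbs : Int) n = (Int.gcd m n : Int) := by
    rw [euclid_eq n.natAbs (m.natAbs : Int) n (by omega) (by omega) (le_refl _)]
    congr 1
  have hg : 1 ≤ (Int.gcd m n : Int) := by
    have := Int.gcd_pos_of_ne_zero_right m (show n ≠ 0 by omega)
    omega
  unfold gcdConsecInter_alt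
  rw [if_neg (by omega)]
  simp only [hgcd, if_neg hm]
  congr 3
  rw [loopS_eq (m.natAbs : Int) (Int.gcd m n : Int) n hM hg ((m.natAbs : Int) + 1 - 1).toNat 1 0 (by omega) (le_refl _)]
  have hfc : (Finset.Icc (Int.gcd m n : Int) n).filter (fun t => t ∣ (m.natAbs : Int) ∧ 1 ≤ t ∧ 1 ≤ (m.natAbs : Int) / t)
      = (Finset.Icc (Int.gcd m n : Int) n).filter (fun t => t ∣ m) := by
    apply Finset.filter_congr
    intro t ht
    rw [Finset.mem_Icc] at ht
    have ht1 : 1 ≤ t := le_trans hg ht.1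
    constructor
    · rintro ⟨htM, _, _⟩
      exact Int.dvd_natAbs.mp htM
    · intro htm
      have htM : t ∣ (m.natAbs : Int) := Int.dvd_natAbs.mpr htm
      refine ⟨htM, ht1, ?_⟩
      have htle : t ≤ (m.natAbs : Int) := Int.le_of_dvd (by omega) htM
      exact (Int.le_ediv_iff_mul_le (by omega : (0:Int) < t)).mpr (by omega)
  rw [hfc]
  ring

-- ===== VERDICT (by name: the statement is the Claim_ definition above) =====
theorem gcdConsecInter_spec : Claim_equal_gcdConsecInter := by
  intro m n _
  unfold Spec_gcdConsecInter
  by_cases hn : n ≤ 0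
  · unfold gcdConsecInter gcdConsecInter_alt
    rw [pvLoopA_nonpos m n 0 n (by omega), if_pos hn]
  · by_cases hm : m = 0
    · subst hm
      rw [A_eq 0 n (by omega)]
      have hgcd0 : (Int.gcd 0 n : Int) = n := by
        rw [Int.gcd_zero_left]
        exact Int.natAbs_of_nonneg (by omega)
      have heu : pvEuclid 0 n = n := by
        rw [euclid_eq n.natAbs 0 n le_rfl (by omega) (le_refl _)]
        exact hgcd0
      have hdiv : ((Finset.Icc n n).filter (fun t => t ∣ (0:Int))).card = 1 := by
        simp [Finset.Icc_self, Finset.filter_singleton]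
      unfold gcdConsecInter_alt
      rw [if_neg hn]
      simp only [show ((Int.natAbs 0 : Int)) = 0 from rfl, heu, reduceIte, hgcd0, hdiv]
      norm_num
    · rw [A_eq m n (by omega), B_eq m n (by omega) hm]
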